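-- pv_equiv track=rewrite | github.com/tracy040401/Albert_BIO | input.py | count_examples_and_max_length
-- ===== SOURCE A (Python) =====
-- def count_examples_and_max_length(data):
--     num_examples = 0
--     max_length = 0
--
--     current_length = 0
--     for line in data:
--         if line.strip():  # Check if the line is not empty
--             current_length += 1
--         else:
--             num_examples += 1
--             max_length = max(max_length, current_length)
--             current_length = 0
--
--     # Handle the case if the last example doesn't end with an empty line
--     if current_length > 0:
--         num_examples += 1
--         max_length = max(max_length, current_length)
--
--     return num_examples, max_length
-- ===== SOURCE B (Python) =====
-- def count_examples_and_max_length(data):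
--     lines = list(data)
--     n = len(lines)
--     blanks = [i for i, line in enumerate(lines) if not line.strip()]
--     num_examples = len(blanks) + (1 if n > 0 and (n - 1) not in blanks else 0)
--     bounds = [-1] + blanks + [n]
--     max_length = max(b - a - 1 for a, b in zip(bounds, bounds[1:]))
--     return num_examples, max_length
-- ===== Notes on version B (the rewrite author's own statement) =====
-- stated objective: alternative
-- what changed: B first materialises the list of blank-line indices, derives the count from len(blanks) plus a last-index membership test, and derives max_length as the maximum difference between consecutive elements of the sentinel-extended blank-index list, instead of A's single-pass state machine with a running current_length.
import Mathlib
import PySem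

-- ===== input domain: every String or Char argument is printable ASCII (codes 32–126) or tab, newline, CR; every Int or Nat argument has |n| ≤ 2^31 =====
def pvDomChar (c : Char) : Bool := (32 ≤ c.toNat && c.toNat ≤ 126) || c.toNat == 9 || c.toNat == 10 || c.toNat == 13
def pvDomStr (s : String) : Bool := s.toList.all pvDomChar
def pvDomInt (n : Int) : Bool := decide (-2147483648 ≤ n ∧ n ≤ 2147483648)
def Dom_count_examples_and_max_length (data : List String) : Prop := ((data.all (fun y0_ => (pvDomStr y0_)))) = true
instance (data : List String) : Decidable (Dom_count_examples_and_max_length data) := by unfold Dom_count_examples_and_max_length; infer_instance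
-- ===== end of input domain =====

-- B derives both outputs from the list of blank-line indices by index arithmetic (alternative decomposition; no speed claim).

-- ===== PORT A =====
-- truthiness of line.strip(): nonempty after stripping whitespace
def pvTruthy (s : String) : Bool := !(PySem.Str.strip s == "")

def aStep (st : Int × Int × Int) (line : String) : Int × Int × Int :=
  if pvTruthy line then (st.1, st.2.1, st.2.2 + 1)
  else (st.1 + 1, max st.2.1 st.2.2, 0)

def count_examples_and_max_length (data : List String) : Int × Int :=
  let st := data.foldl aStep (0, 0, 0)
  if st.2.2 > 0 then (st.1 + 1, max st.2.1 st.2.2) else (st.1, st.2.1)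

-- ===== PORT B =====
def count_examples_and_max_length_alt (data : List String) : Int × Int :=
  let n : Int := data.length
  let blanks : List Int :=
    (PySem.List.enumerate data).filterMap (fun p => if pvTruthy p.2 then none else some p.1)
  let num_examples : Int := blanks.length + (if 0 < n ∧ (n - 1) ∉ blanks then 1 else 0)
  let bounds : List Int := (-1) :: (blanks ++ [n])
  -- bounds has at least two elements, so the gap list is nonempty and max? is always some;
  -- the .getD 0 default is unreachable (it only discharges the Option)
  let max_length : Int :=
    (PySem.List.max? ((bounds.zip bounds.tail).map (fun p => p.2 - p.1 - 1)) (fun x => x)).getD 0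
  (num_examples, max_length)

-- ===== PRECONDITION & SPEC =====
def Spec_count_examples_and_max_length (data : List String) (out : Int × Int) : Prop := out = count_examples_and_max_length_alt data
instance (data : List String) (out : Int × Int) : Decidable (Spec_count_examples_and_max_length data out) := by unfold Spec_count_examples_and_max_length; infer_instance

-- ===== CLAIM (what is proved, stated in full; the proofs are below) =====
def Claim_equal_count_examples_and_max_length : Prop := ∀ (data : List String), Dom_count_examples_and_max_length data → Spec_count_examples_and_max_length data (count_examples_and_max_length data)

-- ===== LEMMAS AND PROOFS =====

def blanksOf (l : List String) : List Int :=
  (PySem.List.enumerate l).filterMap (fun p => if pvTruthy p.2 then none else some p.1)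

def lastB (l : List String) : Int := (blanksOf l).getLast?.getD (-1)

def gapsOf (bs : List Int) : List Int := (bs.zip bs.tail).map (fun p => p.2 - p.1 - 1)

def innerMax (l : List String) : Int := (gapsOf ((-1) :: blanksOf l)).foldl max 0

lemma blanksOf_concat (l : List String) (x : String) :
    blanksOf (l ++ [x]) = blanksOf l ++ (if pvTruthy x then [] else [(l.length : Int)]) := by
  unfold blanksOf
  rw [PySem.List.enumerate_append]
  rw [List.filterMap_append]
  congr 1
  rw [PySem.List.enumerate_cons, PySem.List.enumerate_nil]
  by_cases h : pvTruthy x <;> simp [h]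

lemma getD_last_irrel {rs : List Int} (h : rs ≠ []) (x y : Int) :
    rs.getLast?.getD x = rs.getLast?.getD y := by
  cases hr : rs.getLast? with
  | none => exact absurd (List.getLast?_eq_none_iff.mp hr) h
  | some v => rfl

lemma zip_tail_concat (a : Int) (rest : List Int) (y : Int) :
    ((a :: rest) ++ [y]).zip (rest ++ [y]) =
      (a :: rest).zip rest ++ [(rest.getLast?.getD a, y)] := by
  induction rest generalizing a with
  | nil => simp
  | cons b rs ih =>
    have h := ih b
    simp only [List.cons_append, List.zip_cons_cons] at h ⊢
    rw [h]
    have he : rs.getLast?.getD b = (b :: rs).getLast?.getD a := by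
      cases rs with
      | nil => simp
      | cons c cs =>
        rw [List.getLast?_cons_cons]
        exact getD_last_irrel (by simp) _ _
    rw [he]

lemma foldl_max_nonneg (xs : List Int) (a : Int) (h : 0 ≤ a) : 0 ≤ xs.foldl max a := by
  induction xs generalizing a with
  | nil => simpa
  | cons x t ih => exact ih _ (le_trans h (le_max_left a x))

lemma foldl_max_concat (xs : List Int) (a c : Int) :
    (xs ++ [c]).foldl max a = max (xs.foldl max a) c := by
  simp [List.foldl_append]

lemma zip_tail_cons_concat (bl : List Int) (L n : Int) (hL : bl.getLast?.getD (-1) = L) :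
    (((-1 : Int) :: (bl ++ [n])).zip (((-1 : Int) :: (bl ++ [n]))).tail).map
        (fun p => p.2 - p.1 - 1) =
      (((-1 : Int) :: bl).zip bl).map (fun p => p.2 - p.1 - 1) ++ [n - L - 1] := by
  have h := zip_tail_concat (-1) bl n
  simp only [List.cons_append] at h
  rw [List.tail_cons, h, List.map_append, hL]
  simp

lemma innerMax_concat_blank (l : List String) (x : String) (hx : pvTruthy x = false) :
    innerMax (l ++ [x]) = max (innerMax l) ((l.length : Int) - lastB l - 1) := by
  unfold innerMax gapsOf
  rw [blanksOf_concat, hx]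
  rw [if_neg (by simp)]
  rw [zip_tail_cons_concat (blanksOf l) (lastB l) (l.length : Int) rfl]
  rw [foldl_max_concat]
  simp only [List.tail_cons]

lemma inv (l : List String) :
    l.foldl aStep (0, 0, 0) =
      (((blanksOf l).length : Int), innerMax l, (l.length : Int) - lastB l - 1)
    ∧ (lastB l = -1 ∨ lastB l ∈ blanksOf l)
    ∧ (∀ i ∈ blanksOf l, 0 ≤ i ∧ i ≤ lastB l ∧ i < (l.length : Int)) := by
  induction l using List.reverseRecOn with
  | nil =>
    refine ⟨?_, Or.inl rfl, by simp [blanksOf, PySem.List.enumerate_nil]⟩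
    simp [blanksOf, PySem.List.enumerate_nil, lastB, innerMax, gapsOf]
  | append_singleton l x ih =>
    obtain ⟨h1, h2, h3⟩ := ih
    have hLlt : lastB l < (l.length : Int) := by
      rcases h2 with h | h
      · rw [h]; have : (0:Int) ≤ l.length := Int.natCast_nonneg _; omega
      · exact (h3 _ h).2.2
    have hbc := blanksOf_concat l x
    by_cases hx : pvTruthy x
    · -- nonempty line: blanks unchanged, trailing run grows by one
      have hb : blanksOf (l ++ [x]) = blanksOf l := by rw [hbc, hx]; simp
      have hlast : lastB (l ++ [x]) = lastB l := by unfold lastB; rw [hb]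
      have him : innerMax (l ++ [x]) = innerMax l := by unfold innerMax; rw [hb]
      refine ⟨?_, ?_, ?_⟩
      · rw [List.foldl_append, h1]
        simp only [List.foldl_cons, List.foldl_nil, aStep, hx]
        rw [hb, hlast, him]
        refine Prod.ext rfl (Prod.ext rfl ?_)
        simp only [List.length_append, List.length_cons, List.length_nil]
        push_cast; ring
      · rw [hb, hlast]; exact h2
      · rw [hb, hlast]
        intro i hi
        obtain ⟨a, b, c⟩ := h3 i hi
        refine ⟨a, b, ?_⟩
        simp only [List.length_append, List.length_cons, List.length_nil]
        push_cast; omega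
    · -- blank line: index l.length is appended to blanks
      have hxf : pvTruthy x = false := by simpa using hx
      have hb : blanksOf (l ++ [x]) = blanksOf l ++ [(l.length : Int)] := by
        rw [hbc, hxf]; simp
      have hlast : lastB (l ++ [x]) = (l.length : Int) := by
        unfold lastB; rw [hb, List.getLast?_concat]; rfl
      have him := innerMax_concat_blank l x hxf
      refine ⟨?_, ?_, ?_⟩
      · rw [List.foldl_append, h1]
        simp only [List.foldl_cons, List.foldl_nil, aStep, hxf, Bool.false_eq_true]
        rw [if_neg (by simp)]
        rw [hb, hlast, him]
        refine Prod.ext ?_ (Prod.ext rfl ?_)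
        · simp only [List.length_append, List.length_cons, List.length_nil]; push_cast; ring
        · simp only [List.length_append, List.length_cons, List.length_nil]; push_cast; ring
      · rw [hb, hlast]; right; simp
      · rw [hb, hlast]
        intro i hi
        rcases List.mem_append.mp hi with h | h
        · obtain ⟨a, b, c⟩ := h3 i h
          refine ⟨a, by omega, ?_⟩
          simp only [List.length_append, List.length_cons, List.length_nil]; push_cast; omega
        · simp only [List.mem_singleton] at h
          subst h
          refine ⟨Int.natCast_nonneg _, le_refl _, ?_⟩
          simp only [List.length_append, List.length_cons, List.length_nil]; push_cast; omega

lemma alt_eq (data : List String) :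
    count_examples_and_max_length_alt data =
      (((blanksOf data).length : Int) +
        (if 0 < (data.length : Int) ∧ ((data.length : Int) - 1) ∉ blanksOf data then 1 else 0),
       (PySem.List.max?
          (((((-1 : Int) :: (blanksOf data ++ [(data.length : Int)])).zip
              (((-1 : Int) :: (blanksOf data ++ [(data.length : Int)]))).tail).map
            (fun p => p.2 - p.1 - 1))) (fun x => x)).getD 0) := rfl

lemma a_eq (data : List String) :
    count_examples_and_max_length data =
      (if ((data.length : Int) - lastB data - 1) > 0
        then (((blanksOf data).length : Int) + 1,
              max (innerMax data) ((data.length : Int) - lastB data - 1))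
        else (((blanksOf data).length : Int), innerMax data)) := by
  unfold count_examples_and_max_length
  rw [(inv data).1]

-- ===== VERDICT (by name: the statement is the Claim_ definition above) =====
theorem count_examples_and_max_length_spec : Claim_equal_count_examples_and_max_length := by
  intro data _
  unfold Spec_count_examples_and_max_length
  obtain ⟨h1, h2, h3⟩ := inv data
  rw [a_eq data, alt_eq data]
  rw [zip_tail_cons_concat (blanksOf data) (lastB data) (data.length : Int) rfl]
  set n : Int := (data.length : Int) with hn
  set bl := blanksOf data with hbl
  set L := lastB data with hL
  set im := innerMax data with him
  have hn0 : (0:Int) ≤ n := Int.natCast_nonneg _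
  have hLlt : L < n := by
    rcases h2 with h | h
    · rw [h]; omega
    · exact (h3 _ h).2.2
  have him0 : 0 ≤ im := foldl_max_nonneg _ _ le_rfl
  have hLge : (-1 : Int) ≤ L := by
    rcases h2 with h | h
    · rw [h]
    · exact le_trans (by omega) (h3 _ h).1
  have hnum : (n - L - 1 > 0) ↔ (0 < n ∧ (n - 1) ∉ bl) := by
    constructor
    · intro hc
      refine ⟨by omega, fun hmem => ?_⟩
      have := (h3 _ hmem).2.1
      omega
    · rintro ⟨hpos, hnot⟩
      rcases h2 with h | h
      · omega
      · have hLn : L ≠ n - 1 := fun he => hnot (he ▸ h)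
        omega
  have hmax : ((PySem.List.max?
        ((((-1 : Int) :: bl).zip bl).map (fun p => p.2 - p.1 - 1) ++ [n - L - 1])
        (fun x => x)).getD 0) = max im (n - L - 1) := by
    have hc0 : 0 ≤ n - L - 1 := by omega
    rcases hblc : bl with _ | ⟨b0, bs⟩
    · have hbd : blanksOf data = [] := hbl ▸ hblc
      have himz : im = 0 := by
        rw [him]; unfold innerMax gapsOf; rw [hbd]; simp
      simp only [List.zip_nil_right, List.map_nil, List.nil_append]
      rw [PySem.List.max?_id_cons]
      simp only [List.foldl_nil, Option.getD_some]
      rw [himz]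
      exact (max_eq_right hc0).symm
    · have hb0 : 0 ≤ b0 := (h3 b0 (by rw [hblc]; simp)).1
      have hbd : blanksOf data = b0 :: bs := hbl ▸ hblc
      simp only [List.zip_cons_cons, List.map_cons, List.cons_append]
      rw [PySem.List.max?_id_cons]
      rw [foldl_max_concat]
      have himv : im = (((b0 :: bs).zip bs).map (fun p => p.2 - p.1 - 1)).foldl max (b0 - -1 - 1) := by
        rw [him]; unfold innerMax gapsOf; rw [hbd]
        simp only [List.tail_cons, List.zip_cons_cons, List.map_cons, List.foldl_cons]
        congr 1
        omega
      rw [himv]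
      simp
  rw [hmax]
  by_cases hc : n - L - 1 > 0
  · rw [if_pos hc, if_pos (hnum.mp hc)]
  · rw [if_neg hc, if_neg (fun h => hc (hnum.mpr h))]
    have hz : n - L - 1 = 0 := by omega
    rw [hz]
    refine Prod.ext (by simp) ?_
    simp only
    omega
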